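-- pv_equiv track=rewrite | github.com/Mounikabalagani19/skillsprint | backend/app/nlp_generator.py | _question_type_targets
-- ===== SOURCE A (Python) =====
-- def _question_type_targets(num_questions: int) -> tuple[int, int, int]:
--     """Return target counts for (mcq, fill_blank, true_false)."""
--     pattern = ["mcq"] * 5 + ["fill_blank"] * 4 + ["true_false"]
--     mcq_target = 0
--     fill_target = 0
--     true_false_target = 0
--
--     for index in range(max(0, num_questions)):
--         question_type = pattern[index % len(pattern)]
--         if question_type == "mcq":
--             mcq_target += 1
--         elif question_type == "fill_blank":
--             fill_target += 1
--         else: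
--             true_false_target += 1
--
--     return mcq_target, fill_target, true_false_target
-- ===== SOURCE B (Python) =====
-- def _question_type_targets(num_questions: int) -> tuple[int, int, int]:
--     """Return target counts for (mcq, fill_blank, true_false)."""
--     full, r = divmod(max(0, num_questions), 10)
--     return (5 * full + min(r, 5),
--             4 * full + min(max(r - 5, 0), 4),
--             full + max(r - 9, 0))
-- ===== Notes on version B (the rewrite author's own statement) =====
-- stated objective: faster
-- what changed: Replaced the O(n) loop over the 10-element type pattern by a closed-form divmod computation: counts from full 10-cycles plus clamped remainder contributions.
import Mathlib
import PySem

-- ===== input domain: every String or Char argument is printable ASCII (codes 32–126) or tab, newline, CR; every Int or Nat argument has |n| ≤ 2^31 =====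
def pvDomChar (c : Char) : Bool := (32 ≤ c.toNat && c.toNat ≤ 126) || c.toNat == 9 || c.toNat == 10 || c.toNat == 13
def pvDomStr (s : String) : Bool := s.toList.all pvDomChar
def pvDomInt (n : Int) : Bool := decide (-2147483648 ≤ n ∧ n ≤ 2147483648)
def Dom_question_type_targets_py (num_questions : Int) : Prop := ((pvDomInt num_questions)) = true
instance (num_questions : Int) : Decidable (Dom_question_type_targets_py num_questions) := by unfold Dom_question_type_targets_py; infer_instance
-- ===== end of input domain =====

-- B replaces A's O(n) loop over the period-10 pattern by a closed-form divmod computation (objective: faster).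

-- ===== PORT A =====
def qttPattern : List String :=
  List.replicate 5 "mcq" ++ List.replicate 4 "fill_blank" ++ ["true_false"]

def qttStep (s : Int × Int × Int) (index : Int) : Int × Int × Int :=
  let question_type := (PySem.List.pyGet? qttPattern (PySem.Int.mod index (PySem.List.len qttPattern))).getD ""
  if question_type = "mcq" then (s.1 + 1, s.2.1, s.2.2)
  else if question_type = "fill_blank" then (s.1, s.2.1 + 1, s.2.2)
  else (s.1, s.2.1, s.2.2 + 1)

def question_type_targets_py (num_questions : Int) : List Int :=
  let res := (PySem.List.pyRange 0 (max 0 num_questions) 1).foldl qttStep (0, 0, 0)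
  [res.1, res.2.1, res.2.2]

-- ===== PORT B =====
def question_type_targets_py_alt (num_questions : Int) : List Int :=
  let full := PySem.Int.floordiv (max 0 num_questions) 10
  let r := PySem.Int.mod (max 0 num_questions) 10
  [5 * full + min r 5, 4 * full + min (max (r - 5) 0) 4, full + max (r - 9) 0]

-- ===== PRECONDITION & SPEC =====
def Spec_question_type_targets_py (num_questions : Int) (out : List Int) : Prop := out = question_type_targets_py_alt num_questions
instance (num_questions : Int) (out : List Int) : Decidable (Spec_question_type_targets_py num_questions out) := by unfold Spec_question_type_targets_py; infer_instance

-- ===== CLAIM (what is proved, stated in full; the proofs are below) =====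
def Claim_equal_question_type_targets_py : Prop := ∀ (num_questions : Int), Dom_question_type_targets_py num_questions → Spec_question_type_targets_py num_questions (question_type_targets_py num_questions)

-- ===== LEMMAS AND PROOFS =====

-- A's pattern lookup, expressed arithmetically on the index
theorem qttStep_eq (s : Int × Int × Int) (i : Int) (h : 0 ≤ i) :
    qttStep s i =
      if i % 10 < 5 then (s.1 + 1, s.2.1, s.2.2)
      else if i % 10 < 9 then (s.1, s.2.1 + 1, s.2.2)
      else (s.1, s.2.1, s.2.2 + 1) := by
  have hlen : PySem.List.len qttPattern = 10 := by decide
  have hmod : PySem.Int.mod i (PySem.List.len qttPattern) = i % 10 := by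
    rw [hlen, PySem.Int.mod_eq_emod_of_pos (by omega)]
  have hr0 : 0 ≤ i % 10 := Int.emod_nonneg i (by omega)
  have hr9 : i % 10 < 10 := Int.emod_lt_of_pos i (by omega)
  unfold qttStep
  rw [hmod]
  set r := i % 10 with hrdef
  interval_cases r <;> simp [qttPattern, PySem.List.pyGet?, PySem.List.pyIdx?, PySem.List.len]

-- closed form of A's loop on a Nat bound
theorem qtt_loop_eq (m : Nat) :
    (PySem.List.pyRange 0 (m : Int) 1).foldl qttStep (0, 0, 0) =
      (5 * ((m : Int) / 10) + min ((m : Int) % 10) 5,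
       4 * ((m : Int) / 10) + min (max ((m : Int) % 10 - 5) 0) 4,
       (m : Int) / 10 + max ((m : Int) % 10 - 9) 0) := by
  induction m with
  | zero => simp [PySem.List.pyRange_one_eq_nil (by omega : (0:Int) ≤ 0)]
  | succ k ih =>
    have hcast : ((k + 1 : Nat) : Int) = (k : Int) + 1 := by push_cast; ring
    rw [hcast, PySem.List.pyRange_one_succ_right (by omega : (0:Int) ≤ (k : Int)),
        List.foldl_append, ih]
    simp only [List.foldl_cons, List.foldl_nil]
    rw [qttStep_eq _ _ (by omega)]
    split_ifs <;> refine Prod.ext ?_ (Prod.ext ?_ ?_) <;> simp <;> omega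

theorem question_type_targets_py_spec : Claim_equal_question_type_targets_py := by
  intro n _
  unfold Spec_question_type_targets_py question_type_targets_py question_type_targets_py_alt
  have hmax : max 0 n = ((max 0 n).toNat : Int) := by omega
  rw [hmax, qtt_loop_eq]
  have hfd : PySem.Int.floordiv (((max 0 n).toNat : Int)) 10 = ((max 0 n).toNat : Int) / 10 :=
    PySem.Int.floordiv_eq_ediv_of_pos (by omega)
  have hmd : PySem.Int.mod (((max 0 n).toNat : Int)) 10 = ((max 0 n).toNat : Int) % 10 :=
    PySem.Int.mod_eq_emod_of_pos (by omega)
  simp [hfd, hmd]
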